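-- pv_equiv track=rewrite | github.com/organic-xml-parser/pythonoccutils | src/pythonoccutils/part_manager.py | get_index_ranges
-- ===== SOURCE A (Python) =====
-- import typing
--
-- def get_index_ranges(sublist: typing.List,
--                      superlist: typing.List) -> typing.Generator[typing.Tuple[int, typing.Optional[int]], None, None]:
--     indices = [superlist.index(s) for s in sublist]
--     indices.sort()
--
--     while len(indices) > 0:
--         start_index = indices.pop(0)
--         end_index = start_index
--         while len(indices) > 0 and indices[0] == end_index + 1:
--             end_index = indices.pop(0)
--
--         # by this point, have consumed all contiguous elements
--         if start_index == end_index: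
--             yield start_index, None
--         else:
--             yield start_index, end_index
-- ===== SOURCE B (Python) =====
-- def get_index_ranges(sublist, superlist):
--     # One pass builds a first-occurrence index table; a single linear sweep over
--     # the sorted indices groups them into contiguous ranges (no pop(0), no rescans).
--     first = {}
--     for i, v in enumerate(superlist):
--         first.setdefault(v, i)
--     idxs = sorted(first[s] for s in sublist)
--     out = []
--     if idxs:
--         start = idxs[0]
--         end = idxs[0]
--         for i in idxs[1:]:
--             if i == end + 1:
--                 end = i
--             else:
--                 out.append((start, None) if start == end else (start, end))
--                 start = i
--                 end = i
--         out.append((start, None) if start == end else (start, end))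
--     return out
-- ===== Notes on version B (the rewrite author's own statement) =====
-- stated objective: faster
-- what changed: B replaces the per-element superlist.index scan with a first-occurrence dict built in one pass over superlist, and replaces the nested pop(0) loops with a single linear sweep over the sorted indices carrying (start,end) accumulators.
import Mathlib
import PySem

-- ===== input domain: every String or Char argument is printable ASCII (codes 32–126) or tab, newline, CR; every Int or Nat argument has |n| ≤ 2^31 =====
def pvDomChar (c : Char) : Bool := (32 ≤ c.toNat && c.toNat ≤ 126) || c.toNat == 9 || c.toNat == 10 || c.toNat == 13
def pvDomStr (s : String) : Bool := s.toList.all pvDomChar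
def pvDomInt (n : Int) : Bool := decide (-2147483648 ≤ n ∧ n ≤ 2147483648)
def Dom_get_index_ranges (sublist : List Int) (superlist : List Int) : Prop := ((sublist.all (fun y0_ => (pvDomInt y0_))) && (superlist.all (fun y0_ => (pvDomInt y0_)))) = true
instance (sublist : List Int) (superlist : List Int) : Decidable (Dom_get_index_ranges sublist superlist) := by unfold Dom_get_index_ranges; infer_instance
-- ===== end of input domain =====

-- B builds a first-occurrence dict and groups the sorted indices in one linear sweep
-- (instead of superlist.index per element and nested pop(0) loops); measurably faster.

-- ===== PORT A =====
-- inner 'while len(indices) > 0 and indices[0] == end_index + 1: end_index = indices.pop(0)'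
def aConsume (e : Int) : List Int → Int × List Int
  | [] => (e, [])
  | x :: xs => if x = e + 1 then aConsume x xs else (e, x :: xs)

theorem aConsume_len (e : Int) (l : List Int) : (aConsume e l).2.length ≤ l.length := by
  induction l generalizing e with
  | nil => simp [aConsume]
  | cons x xs ih =>
    simp only [aConsume]
    split
    · exact le_trans (ih x) (Nat.le_succ _)
    · simp

-- outer 'while len(indices) > 0' loop with pop(0) and the yields
def aLoop : List Int → List (Int × Option Int)
  | [] => []
  | start :: rest =>
    let p := aConsume start rest
    (if start = p.1 then (start, none) else (start, some p.1)) :: aLoop p.2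
termination_by l => l.length
decreasing_by
  exact Nat.lt_succ_of_le (aConsume_len start rest)

def get_index_ranges (sublist : List Int) (superlist : List Int) : List (Int × Option Int) :=
  -- superlist.index(s) raises ValueError when s ∉ superlist: Pre_ excludes that; getD 0 there
  let indices := sublist.map (fun s => (((PySem.List.index? superlist s).getD 0 : Nat) : Int))
  let indices := PySem.List.sorted indices (fun x => x) false
  aLoop indices

-- ===== PORT B =====
-- 'out.append((start, None) if start == end else (start, end))'
def bFlush (s e : Int) : Int × Option Int := if s = e then (s, none) else (s, some e)

def get_index_ranges_alt (sublist : List Int) (superlist : List Int) : List (Int × Option Int) :=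
  let first := (PySem.List.enumerate superlist 0).foldl
    (fun (d : PySem.Dict Int Int) p => d.setdefault p.2 p.1) PySem.Dict.empty
  -- first[s] raises KeyError when s is missing: outside Pre_; getD 0 there
  let idxs := PySem.List.sorted (sublist.map (fun s => (first.get? s).getD 0)) (fun x => x) false
  match idxs with
  | [] => []
  | x :: rest =>
    let st := rest.foldl
      (fun (st : List (Int × Option Int) × Int × Int) i =>
        if i = st.2.2 + 1 then (st.1, st.2.1, i) else (st.1 ++ [bFlush st.2.1 st.2.2], i, i))
      ([], x, x)
    st.1 ++ [bFlush st.2.1 st.2.2]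

-- ===== PRECONDITION & SPEC =====
-- Pre_: exactly the inputs on which Python A returns (superlist.index raises ValueError otherwise)
def Pre_get_index_ranges (sublist : List Int) (superlist : List Int) : Prop :=
  ∀ s ∈ sublist, s ∈ superlist
instance (sublist : List Int) (superlist : List Int) : Decidable (Pre_get_index_ranges sublist superlist) := by unfold Pre_get_index_ranges; infer_instance
def pvWitness_get_index_ranges : List Int × List Int := ([3, 1, 2, 7], [0, 1, 2, 3, 7, 9])

def Spec_get_index_ranges (sublist : List Int) (superlist : List Int) (out : List (Int × Option Int)) : Prop := out = get_index_ranges_alt sublist superlist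
instance (sublist : List Int) (superlist : List Int) (out : List (Int × Option Int)) : Decidable (Spec_get_index_ranges sublist superlist out) := by unfold Spec_get_index_ranges; infer_instance

-- ===== CLAIM (what is proved, stated in full; the proofs are below) =====
def Claim_equal_get_index_ranges : Prop := ∀ (sublist : List Int) (superlist : List Int), Dom_get_index_ranges sublist superlist → Pre_get_index_ranges sublist superlist → Spec_get_index_ranges sublist superlist (get_index_ranges sublist superlist)

-- ===== LEMMAS AND PROOFS =====

-- B's grouping sweep, recursively (proof helper bridging the foldl to aLoop)
def bLoop (s e : Int) : List Int → List (Int × Option Int)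
  | [] => [bFlush s e]
  | i :: rest => if i = e + 1 then bLoop s i rest else bFlush s e :: bLoop i i rest

theorem bfold_eq_bLoop (l : List Int) : ∀ (out : List (Int × Option Int)) (s e : Int),
    (l.foldl
      (fun (st : List (Int × Option Int) × Int × Int) i =>
        if i = st.2.2 + 1 then (st.1, st.2.1, i) else (st.1 ++ [bFlush st.2.1 st.2.2], i, i))
      (out, s, e)).1
      ++ [bFlush
            (l.foldl
              (fun (st : List (Int × Option Int) × Int × Int) i =>
                if i = st.2.2 + 1 then (st.1, st.2.1, i) else (st.1 ++ [bFlush st.2.1 st.2.2], i, i))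
              (out, s, e)).2.1
            (l.foldl
              (fun (st : List (Int × Option Int) × Int × Int) i =>
                if i = st.2.2 + 1 then (st.1, st.2.1, i) else (st.1 ++ [bFlush st.2.1 st.2.2], i, i))
              (out, s, e)).2.2]
      = out ++ bLoop s e l := by
  induction l with
  | nil => intro out s e; simp [bLoop]
  | cons i rest ih =>
    intro out s e
    simp only [List.foldl_cons]
    by_cases h : i = e + 1
    · simp only [bLoop, if_pos h, ih]
    · simp only [bLoop, if_neg h, ih, List.append_assoc, List.singleton_append]

theorem bLoop_eq_aLoop (l : List Int) : ∀ (s e : Int),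
    bLoop s e l = (if s = (aConsume e l).1 then (s, none) else (s, some (aConsume e l).1)) :: aLoop (aConsume e l).2 := by
  induction l with
  | nil => intro s e; simp [bLoop, aConsume, bFlush, aLoop]
  | cons i rest ih =>
    intro s e
    by_cases h : i = e + 1
    · simp only [bLoop, aConsume, if_pos h, ih]
    · simp only [bLoop, aConsume, if_neg h, ih, bFlush]
      rw [aLoop]

-- the first-occurrence dict looks up exactly superlist.index
theorem firstOcc_get? (l : List Int) : ∀ (k : Int) (d : PySem.Dict Int Int) (v : Int),
    ((PySem.List.enumerate l k).foldl (fun (d : PySem.Dict Int Int) p => d.setdefault p.2 p.1) d).get? v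
      = ((d.get? v).orElse (fun _ => (PySem.List.index? l v).map (fun n => k + (n : Int)))) := by
  induction l with
  | nil =>
    intro k d v
    cases hd : d.get? v <;> simp [PySem.List.enumerate_nil, hd]
  | cons x xs ih =>
    intro k d v
    rw [PySem.List.enumerate_cons]
    simp only [List.foldl_cons, ih]
    by_cases hc : d.contains x = true
    · rw [PySem.Dict.setdefault_of_contains d k hc]
      by_cases hv : v = x
      · subst hv
        have hs : (d.get? v).isSome := by rw [← PySem.Dict.contains_eq_isSome_get?]; exact hc
        obtain ⟨w, hw⟩ := Option.isSome_iff_exists.mp hs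
        simp [hw]
      · rw [PySem.List.index?_cons_of_ne xs (fun h => hv h.symm)]
        cases hd : d.get? v <;> cases hx : PySem.List.index? xs v <;> simp <;> omega
    · have hc' : d.contains x = false := by simpa using hc
      rw [PySem.Dict.setdefault_of_not_contains d k hc']
      by_cases hv : v = x
      · subst hv
        have hd : d.get? v = none := (PySem.Dict.get?_eq_none_iff_contains d v).mpr hc'
        rw [PySem.Dict.get?_insert, if_pos rfl, hd, PySem.List.index?_cons_self]
        simp
      · rw [PySem.Dict.get?_insert, if_neg hv,
          PySem.List.index?_cons_of_ne xs (fun h => hv h.symm)]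
        cases hd : d.get? v <;> cases hx : PySem.List.index? xs v <;> simp <;> omega

theorem idx_maps_eq (superlist : List Int) (s : Int) :
    ((((PySem.List.enumerate superlist 0).foldl
        (fun (d : PySem.Dict Int Int) p => d.setdefault p.2 p.1) PySem.Dict.empty).get? s).getD 0)
      = (((PySem.List.index? superlist s).getD 0 : Nat) : Int) := by
  rw [firstOcc_get?, PySem.Dict.get?_empty]
  cases hx : PySem.List.index? superlist s <;> simp

-- ===== VERDICT (by name: the statement is the Claim_ definition above) =====
theorem get_index_ranges_spec : Claim_equal_get_index_ranges := by
  intro sublist superlist _hdom _hpre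
  unfold Spec_get_index_ranges get_index_ranges get_index_ranges_alt
  simp only [idx_maps_eq]
  cases h : PySem.List.sorted (sublist.map (fun s => (((PySem.List.index? superlist s).getD 0 : Nat) : Int))) (fun x => x) false with
  | nil => simp [aLoop]
  | cons x rest =>
    simp only
    rw [bfold_eq_bLoop, bLoop_eq_aLoop]
    simp [aLoop]
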